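-- pv_equiv track=rewrite | github.com/1xiaosongz/lll | 5860.py | simple_extract_4
-- ===== SOURCE A (Python) =====
-- def simple_extract_4(arr):
--     """
--     简化版本：执行两次差值计算并提取元素
--     """
--
--     def one_pass(current_arr):
--         extracted = []
--         i = 0
--         while i < len(current_arr) - 1:
--             if current_arr[i + 1] - current_arr[i] < 330:
--                 extracted.append(current_arr[i + 1])
--                 current_arr.pop(i + 1)
--             else:
--                 i += 1
--         return extracted
--
--     remaining = arr.copy()
--     first_extracted = one_pass(remaining)
--     second_extracted = one_pass(remaining)
--
--     return remaining, first_extracted + second_extracted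
-- ===== SOURCE B (Python) =====
-- def simple_extract_4(arr):
--     """
--     简化版本：执行两次差值计算并提取元素
--     (single linear scan with anchor tracking; a second pass can never
--     extract anything since all kept consecutive gaps are >= 330)
--     """
--     if not arr:
--         return [], []
--     remaining = [arr[0]]
--     extracted = []
--     anchor = arr[0]
--     for x in arr[1:]:
--         if x - anchor < 330:
--             extracted.append(x)
--         else:
--             remaining.append(x)
--             anchor = x
--     return remaining, extracted
-- ===== Notes on version B (the rewrite author's own statement) =====
-- stated objective: faster
-- what changed: Replaced the two quadratic pop-in-place while-loop passes with one linear scan tracking the last kept element as anchor (the second pass of A provably never extracts anything, so it is dropped).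
import Mathlib
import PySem

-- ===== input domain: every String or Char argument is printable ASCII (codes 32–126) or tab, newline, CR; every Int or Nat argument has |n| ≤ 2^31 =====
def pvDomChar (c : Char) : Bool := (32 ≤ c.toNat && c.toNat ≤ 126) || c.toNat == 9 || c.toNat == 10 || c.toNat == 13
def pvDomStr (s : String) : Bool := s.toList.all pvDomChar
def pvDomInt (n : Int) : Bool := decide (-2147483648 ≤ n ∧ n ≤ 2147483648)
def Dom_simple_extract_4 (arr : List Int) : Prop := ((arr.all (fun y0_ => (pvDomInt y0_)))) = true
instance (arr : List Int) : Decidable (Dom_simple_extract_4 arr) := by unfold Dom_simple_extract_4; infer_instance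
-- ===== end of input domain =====

-- B replaces A's two quadratic pop-in-place passes by one linear anchor scan (A's second pass never extracts anything); return value only, A mutates nothing observable.

-- ===== PORT A =====
-- one_pass: while i < len-1: if cur[i+1]-cur[i] < 330 pop(i+1) else i+=1.
-- Indices i, i+1 are always in range inside the loop, so List.getD is exact here.
def onePassGo (cur : List Int) (i : Nat) (ext : List Int) : List Int × List Int :=
  if h : i < cur.length - 1 then
    if cur.getD (i + 1) 0 - cur.getD i 0 < 330 then
      onePassGo (cur.eraseIdx (i + 1)) i (ext ++ [cur.getD (i + 1) 0])
    else
      onePassGo cur (i + 1) ext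
  else
    (cur, ext)
termination_by cur.length - i
decreasing_by
  · have hi : i + 1 < cur.length := by omega
    have := List.length_eraseIdx_of_lt hi
    omega
  · omega

def simple_extract_4 (arr : List Int) : List Int × List Int :=
  let p1 := onePassGo arr 0 []
  let p2 := onePassGo p1.1 0 []
  (p2.1, p1.2 ++ p2.2)

-- ===== PORT B =====
def simple_extract_4_alt (arr : List Int) : List Int × List Int :=
  match arr with
  | [] => ([], [])
  | a :: rest =>
    let s := rest.foldl
      (fun (s : List Int × List Int × Int) x =>
        if x - s.2.2 < 330 then (s.1, s.2.1 ++ [x], s.2.2)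
        else (s.1 ++ [x], s.2.1, x))
      ([a], [], a)
    (s.1, s.2.1)

-- ===== PRECONDITION & SPEC =====
def Spec_simple_extract_4 (arr : List Int) (out : List Int × List Int) : Prop := out = simple_extract_4_alt arr
instance (arr : List Int) (out : List Int × List Int) : Decidable (Spec_simple_extract_4 arr out) := by unfold Spec_simple_extract_4; infer_instance

-- ===== CLAIM (what is proved, stated in full; the proofs are below) =====
def Claim_equal_simple_extract_4 : Prop := ∀ (arr : List Int), Dom_simple_extract_4 arr → Spec_simple_extract_4 arr (simple_extract_4 arr)

-- ===== LEMMAS AND PROOFS =====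

-- structural version of B's scan: kept list and extracted list from anchor
def altGo (anchor : Int) : List Int → List Int × List Int
  | [] => ([], [])
  | x :: xs =>
    if x - anchor < 330 then
      ((altGo anchor xs).1, x :: (altGo anchor xs).2)
    else
      (x :: (altGo x xs).1, (altGo x xs).2)

theorem foldl_altGo (rest : List Int) : ∀ (rem ext : List Int) (anchor : Int),
    rest.foldl
      (fun (s : List Int × List Int × Int) x =>
        if x - s.2.2 < 330 then (s.1, s.2.1 ++ [x], s.2.2)
        else (s.1 ++ [x], s.2.1, x))
      (rem, ext, anchor)
    = (rem ++ (altGo anchor rest).1, ext ++ (altGo anchor rest).2,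
       (rest.foldl (fun (s : List Int × List Int × Int) x =>
        if x - s.2.2 < 330 then (s.1, s.2.1 ++ [x], s.2.2)
        else (s.1 ++ [x], s.2.1, x)) (rem, ext, anchor)).2.2) := by
  induction rest with
  | nil => intro rem ext anchor; simp [altGo]
  | cons x xs ih =>
    intro rem ext anchor
    simp only [List.foldl_cons, altGo]
    by_cases hx : x - anchor < 330
    · simp only [if_pos hx]
      rw [ih (rem) (ext ++ [x]) anchor]
      simp
    · simp only [if_neg hx]
      rw [ih (rem ++ [x]) ext x]
      simp

theorem alt_eq_altGo (a : Int) (rest : List Int) :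
    simple_extract_4_alt (a :: rest) = (a :: (altGo a rest).1, (altGo a rest).2) := by
  simp only [simple_extract_4_alt]
  rw [foldl_altGo rest [a] [] a]
  simp

theorem getD_append_len (d x : Int) : ∀ (done l : List Int),
    (done ++ x :: l).getD done.length d = x := by
  intro done; induction done with
  | nil => simp
  | cons y ys ih => intro l; simpa using ih l

theorem eraseIdx_append_len (x : Int) : ∀ (done l : List Int),
    (done ++ x :: l).eraseIdx done.length = done ++ l := by
  intro done; induction done with
  | nil => simp
  | cons y ys ih => intro l; simpa using ih l

-- the loop of one_pass is the anchor scan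
theorem onePassGo_eq (rest : List Int) : ∀ (done ext : List Int) (anchor : Int),
    onePassGo (done ++ anchor :: rest) done.length ext
      = (done ++ anchor :: (altGo anchor rest).1, ext ++ (altGo anchor rest).2) := by
  induction rest with
  | nil =>
    intro done ext anchor
    rw [onePassGo]
    have : ¬ done.length < (done ++ [anchor]).length - 1 := by simp
    simp [altGo, this]
  | cons x xs ih =>
    intro done ext anchor
    rw [onePassGo]
    have hlt : done.length < (done ++ anchor :: x :: xs).length - 1 := by simp
    rw [dif_pos hlt]
    have h1 : (done ++ anchor :: x :: xs).getD done.length 0 = anchor :=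
      getD_append_len 0 anchor done (x :: xs)
    have h2 : (done ++ anchor :: x :: xs).getD (done.length + 1) 0 = x := by
      have := getD_append_len 0 x (done ++ [anchor]) xs
      simpa using this
    rw [h1, h2]
    by_cases hx : x - anchor < 330
    · rw [if_pos hx]
      have he : (done ++ anchor :: x :: xs).eraseIdx (done.length + 1) = done ++ anchor :: xs := by
        have := eraseIdx_append_len x (done ++ [anchor]) xs
        simpa using this
      rw [he, ih done (ext ++ [x]) anchor]
      simp [altGo, hx]
    · rw [if_neg hx]
      have hrw : done ++ anchor :: x :: xs = (done ++ [anchor]) ++ x :: xs := by simp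
      have hlen : done.length + 1 = (done ++ [anchor]).length := by simp
      rw [hrw, hlen, ih (done ++ [anchor]) ext x]
      simp [altGo, hx]

-- the kept list has all consecutive gaps ≥ 330, starting from the anchor
theorem altGo_chain (rest : List Int) : ∀ (anchor : Int),
    List.IsChain (fun p q => 330 ≤ q - p) (anchor :: (altGo anchor rest).1) := by
  induction rest with
  | nil => intro anchor; simp [altGo]
  | cons x xs ih =>
    intro anchor
    by_cases hx : x - anchor < 330
    · simpa [altGo, hx] using ih anchor
    · simp only [altGo, if_neg hx]
      exact List.IsChain.cons_cons (by omega) (ih x)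

-- on such a list the scan extracts nothing
theorem altGo_fixed : ∀ (k : List Int) (anchor : Int),
    List.IsChain (fun p q => 330 ≤ q - p) (anchor :: k) → altGo anchor k = (k, []) := by
  intro k; induction k with
  | nil => intro anchor _; simp [altGo]
  | cons x xs ih =>
    intro anchor hc
    rcases hc with _ | _ | ⟨h1, h2⟩
    have hx : ¬ x - anchor < 330 := by omega
    simp [altGo, hx, ih x h2]

-- ===== VERDICT (by name: the statement is the Claim_ definition above) =====
theorem simple_extract_4_spec : Claim_equal_simple_extract_4 := by
  intro arr _
  unfold Spec_simple_extract_4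
  match arr with
  | [] =>
    rw [simple_extract_4]
    rw [onePassGo]; simp [simple_extract_4_alt, onePassGo]
  | a :: rest =>
    rw [simple_extract_4]
    have h1 := onePassGo_eq rest [] [] a
    simp only [List.nil_append, List.length_nil] at h1
    have h2 := onePassGo_eq (altGo a rest).1 [] [] a
    simp only [List.nil_append, List.length_nil] at h2
    rw [altGo_fixed (altGo a rest).1 a (altGo_chain rest a)] at h2
    rw [alt_eq_altGo]
    simp [h1, h2]
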